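-- pv_equiv track=rewrite | github.com/jchcdwgithub/AOS6-CLI-Parser | aos6parser.py | extract_information_from_table_group
-- ===== SOURCE A (Python) =====
-- def calculate_word_spacing(table_headers):
--     ''' Given the table headers, return an array of indices that separates the columns. '''
--
--     dash_index = 0
--     table_data_limits = [0]
--     while dash_index < len(table_headers):
--             #find space
--         while dash_index < len(table_headers) and table_headers[dash_index] != ' ':
--             dash_index += 1
--         while dash_index < len(table_headers) and table_headers[dash_index] == ' ':
--             dash_index += 1
--         table_data_limits.append(dash_index)
--     return table_data_limits
--
-- def gather_headers(table_headers,table_headers_underscores):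
--     """ Given a line of table headers, return a list of headers. """
--
--     header_index = 0
--     headers = []
--     max_len = len(table_headers) if len(table_headers) < len(table_headers_underscores) else len(table_headers_underscores)
--     while header_index < max_len:
--         current_header = ''
--         while table_headers_underscores[header_index] != ' ':
--             current_header += table_headers[header_index]
--             header_index += 1
--             if header_index == max_len:
--                 break
--         headers.append(current_header)
--         while header_index < max_len and table_headers_underscores[header_index] == ' ':
--                 header_index += 1
--
--     return headers
--
-- def extract_information_from_table_group(table_group,tables):
--     """ table_group is a list of tables separated by table titles and table headers. Return a dictionary of the table columns. """
--
--     current_index = 1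
--     table_title = table_group[0]
--     headers = gather_headers(table_group[current_index+1],table_group[current_index+2])
--     tables[table_title] = [headers]
--     table_positions = index_table_positions(table_group,table_title)
--     table_index = 0
--     while table_index + 1 < len(table_positions):
--         sub_table = table_group[table_positions[table_index]:table_positions[table_index+1]]
--         sub_table_rows = gather_table_columns(sub_table)
--         table_index += 1
--         tables[table_title] += sub_table_rows
--     return tables
--
-- def gather_table_columns(table):
--     """ Given a show table, gather the data from each row into individual column values and return a list of column values. """
--
--     current_index = 0
--     table_header_underscores = table[current_index+3]
--     table_data_limits = calculate_word_spacing(table_header_underscores)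
--     current_table = []
--     current_index += 4
--     while current_index < len(table):
--         column_values = []
--         data_index = 0
--         current_row = table[current_index]
--         while data_index+1 < len(table_data_limits):
--             start_word = table_data_limits[data_index]
--             end_word = table_data_limits[data_index+1]
--             current_value = current_row[start_word:end_word]
--             column_values.append(current_value)
--             data_index += 1
--         current_table.append(column_values)
--         current_index += 1
--     return current_table
--
-- def index_table_positions(table_group,table_title):
--     """ Return an array of positions for the tables in table_group. """
--
--     table_positions = []
--     current_index = 0
--     while current_index < len(table_group):
--         if table_group[current_index] == table_title:
--             table_positions.append(current_index)
--         current_index += 1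
--     table_positions.append(len(table_group))
--     return table_positions
-- ===== SOURCE B (Python) =====
-- def calculate_word_spacing(table_headers):
--     ''' Given the table headers, return an array of indices that separates the columns. '''
--     dash_index = 0
--     table_data_limits = [0]
--     while dash_index < len(table_headers):
--         while dash_index < len(table_headers) and table_headers[dash_index] != ' ':
--             dash_index += 1
--         while dash_index < len(table_headers) and table_headers[dash_index] == ' ':
--             dash_index += 1
--         table_data_limits.append(dash_index)
--     return table_data_limits
--
-- def gather_headers(table_headers, table_headers_underscores):
--     """ Given a line of table headers, return a list of headers. """
--     header_index = 0
--     headers = []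
--     max_len = len(table_headers) if len(table_headers) < len(table_headers_underscores) else len(table_headers_underscores)
--     while header_index < max_len:
--         current_header = ''
--         while table_headers_underscores[header_index] != ' ':
--             current_header += table_headers[header_index]
--             header_index += 1
--             if header_index == max_len:
--                 break
--         headers.append(current_header)
--         while header_index < max_len and table_headers_underscores[header_index] == ' ':
--             header_index += 1
--     return headers
--
-- def _segment_columns(sub_table):
--     """ Column values of one sub-table: slice each data row at the column limits. """
--     limits = calculate_word_spacing(sub_table[3])
--     return [[row[a:b] for a, b in zip(limits, limits[1:])] for row in sub_table[4:]]
--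
-- def extract_information_from_table_group(table_group, tables):
--     """ table_group is a list of tables separated by table titles and table headers. Return a dictionary of the table columns. """
--     table_title = table_group[0]
--     headers = gather_headers(table_group[2], table_group[3])
--     tables[table_title] = [headers]
--     segment = [table_group[0]]
--     for item in table_group[1:]:
--         if item == table_title:
--             tables[table_title] += _segment_columns(segment)
--             segment = [item]
--         else:
--             segment.append(item)
--     tables[table_title] += _segment_columns(segment)
--     return tables
-- ===== Notes on version B (the rewrite author's own statement) =====
-- stated objective: alternative
-- what changed: B replaces A's precomputed occurrence-index array plus slicing between consecutive positions with a single left-to-right pass that accumulates each sub-table segment directly (starting a fresh segment at each title occurrence), and replaces the index-driven while loops of gather_table_columns by a comprehension over zip(limits, limits[1:]) and the rows sub_table[4:].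
import Mathlib
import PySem

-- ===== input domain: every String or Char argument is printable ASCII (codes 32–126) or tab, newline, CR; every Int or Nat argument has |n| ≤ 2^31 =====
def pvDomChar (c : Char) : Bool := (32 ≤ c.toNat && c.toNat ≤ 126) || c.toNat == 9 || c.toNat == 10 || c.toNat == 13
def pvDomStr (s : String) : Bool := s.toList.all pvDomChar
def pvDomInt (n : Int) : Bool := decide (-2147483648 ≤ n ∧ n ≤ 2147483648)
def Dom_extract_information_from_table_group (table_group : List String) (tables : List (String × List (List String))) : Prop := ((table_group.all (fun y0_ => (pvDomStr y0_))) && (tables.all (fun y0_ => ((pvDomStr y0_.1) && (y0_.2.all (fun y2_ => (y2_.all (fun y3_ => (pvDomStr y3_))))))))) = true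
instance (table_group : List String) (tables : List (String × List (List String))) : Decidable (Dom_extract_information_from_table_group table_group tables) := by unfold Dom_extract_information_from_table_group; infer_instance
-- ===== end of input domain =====

-- B segments the table group in one pass instead of A's precomputed-positions-then-slice decomposition;
-- equal return value on Pre_ (both Pythons mutate `tables` in place identically and return it).

-- ===== PORT A =====
-- Every while loop is transcribed as a structural recursion on a fuel counter that provably dominates the
-- number of iterations (each loop advances its index by at least 1 per step); the fuel guard only makes the
-- same computation total.

-- calculate_word_spacing: the two inner skip-loops, then the outer loop (index recursion over the chars).
def cwsFindSpace (cs : List Char) : Nat → Nat → Nat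
  | 0, i => i
  | fuel + 1, i =>
    if h : i < cs.length then
      if cs[i] ≠ ' ' then cwsFindSpace cs fuel (i + 1) else i
    else i

def cwsSkipSpace (cs : List Char) : Nat → Nat → Nat
  | 0, i => i
  | fuel + 1, i =>
    if h : i < cs.length then
      if cs[i] = ' ' then cwsSkipSpace cs fuel (i + 1) else i
    else i

def cwsOuter (cs : List Char) : Nat → Nat → List Nat → List Nat
  | 0, _, acc => acc
  | fuel + 1, i, acc =>
    if i < cs.length then
      cwsOuter cs fuel (cwsSkipSpace cs (cs.length + 1) (cwsFindSpace cs (cs.length + 1) i))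
        (acc ++ [cwsSkipSpace cs (cs.length + 1) (cwsFindSpace cs (cs.length + 1) i)])
    else acc

def calculate_word_spacing (table_headers : String) : List Nat :=
  cwsOuter table_headers.toList (table_headers.toList.length + 1) 0 [0]

-- gather_headers: inner accumulation loop, space-skip loop, outer loop.
-- `List.getD i ' '` is exact for the reachable states: Python only reads indices < max_len ≤ both lengths.
def ghInner (hd u : List Char) (m : Nat) : Nat → Nat → List Char → Nat × List Char
  | 0, i, cur => (i, cur)
  | fuel + 1, i, cur =>
    if u.getD i ' ' ≠ ' ' then
      if i + 1 = m then (i + 1, cur ++ [hd.getD i ' '])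
      else ghInner hd u m fuel (i + 1) (cur ++ [hd.getD i ' '])
    else (i, cur)

def ghSkip (u : List Char) (m : Nat) : Nat → Nat → Nat
  | 0, i => i
  | fuel + 1, i => if i < m ∧ u.getD i ' ' = ' ' then ghSkip u m fuel (i + 1) else i

def ghOuter (hd u : List Char) (m : Nat) : Nat → Nat → List String → List String
  | 0, _, acc => acc
  | fuel + 1, i, acc =>
    if i < m then
      ghOuter hd u m fuel (ghSkip u m (m + 1) (ghInner hd u m (m + 1) i []).1)
        (acc ++ [String.mk (ghInner hd u m (m + 1) i []).2])
    else acc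

def gather_headers (table_headers table_headers_underscores : String) : List String :=
  ghOuter table_headers.toList table_headers_underscores.toList
    (if table_headers.toList.length < table_headers_underscores.toList.length
     then table_headers.toList.length else table_headers_underscores.toList.length)
    ((if table_headers.toList.length < table_headers_underscores.toList.length
      then table_headers.toList.length else table_headers_underscores.toList.length) + 1) 0 []

-- gather_table_columns: row slicing current_row[start:end] with 0 ≤ start,end is drop/take (Python-exact,
-- clamping included); table[3] raises IndexError when the segment is shorter than 4 — excluded by Pre_.
def gtcCols (row : List Char) (limits : List Nat) : Nat → Nat → List String → List String
  | 0, _, acc => acc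
  | fuel + 1, j, acc =>
    if j + 1 < limits.length then
      gtcCols row limits fuel (j + 1)
        (acc ++ [String.mk ((row.drop (limits.getD j 0)).take (limits.getD (j + 1) 0 - limits.getD j 0))])
    else acc

def gtcRows (table : List String) (limits : List Nat) : Nat → Nat → List (List String) → List (List String)
  | 0, _, acc => acc
  | fuel + 1, i, acc =>
    if i < table.length then
      gtcRows table limits fuel (i + 1)
        (acc ++ [gtcCols (table.getD i "").toList limits (limits.length + 1) 0 []])
    else acc

def gather_table_columns (table : List String) : List (List String) :=
  gtcRows table (calculate_word_spacing (table.getD 3 ""))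
    (table.length + 1) 4 []

-- index_table_positions
def itpLoop (tg : List String) (title : String) : Nat → Nat → List Nat → List Nat
  | 0, _, acc => acc
  | fuel + 1, i, acc =>
    if i < tg.length then
      itpLoop tg title fuel (i + 1) (if tg.getD i "" = title then acc ++ [i] else acc)
    else acc

def index_table_positions (table_group : List String) (table_title : String) : List Nat :=
  itpLoop table_group table_title (table_group.length + 1) 0 [] ++ [table_group.length]

-- the main while loop over consecutive position pairs; tables[title] += rows is Dict.modify (key always present)
def aLoop (tg : List String) (title : String) (pos : List Nat) :
    Nat → Nat → PySem.Dict String (List (List String)) → PySem.Dict String (List (List String))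
  | 0, _, d => d
  | fuel + 1, ti, d =>
    if ti + 1 < pos.length then
      aLoop tg title pos fuel (ti + 1)
        (d.modify title []
          (· ++ gather_table_columns ((tg.drop (pos.getD ti 0)).take (pos.getD (ti + 1) 0 - pos.getD ti 0))))
    else d

def extract_information_from_table_group (table_group : List String) (tables : List (String × List (List String))) : List (String × List (List String)) :=
  let table_title := table_group.getD 0 ""
  let headers := gather_headers (table_group.getD 2 "") (table_group.getD 3 "")
  let d := (PySem.Dict.mk tables).insert table_title [headers]
  (aLoop table_group table_title (index_table_positions table_group table_title)
    ((index_table_positions table_group table_title).length + 1) 0 d).items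

-- ===== PORT B =====
-- _segment_columns: comprehension over zip(limits, limits[1:]) and the rows sub_table[4:]
def segment_columns (sub_table : List String) : List (List String) :=
  let limits := calculate_word_spacing (sub_table.getD 3 "")
  (sub_table.drop 4).map (fun row =>
    (limits.zip (limits.drop 1)).map (fun p => String.mk ((row.toList.drop p.1).take (p.2 - p.1))))

def extract_information_from_table_group_alt (table_group : List String) (tables : List (String × List (List String))) : List (String × List (List String)) :=
  let table_title := table_group.getD 0 ""
  let headers := gather_headers (table_group.getD 2 "") (table_group.getD 3 "")
  let d0 := (PySem.Dict.mk tables).insert table_title [headers]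
  let st := (table_group.drop 1).foldl
    (fun (st : PySem.Dict String (List (List String)) × List String) item =>
      if item = table_title then (st.1.modify table_title [] (· ++ segment_columns st.2), [item])
      else (st.1, st.2 ++ [item]))
    (d0, [table_group.getD 0 ""])
  (st.1.modify table_title [] (· ++ segment_columns st.2)).items

-- ===== PRECONDITION & SPEC =====
-- Pre_ excludes exactly the inputs on which the Python A raises IndexError: table_group shorter than 4, or
-- some sub-table segment (between consecutive occurrences of the title, or from the last occurrence to the
-- end) shorter than 4, where gather_table_columns reads table[3].
def Pre_extract_information_from_table_group (table_group : List String) (tables : List (String × List (List String))) : Prop :=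
  4 ≤ table_group.length ∧
  ∀ i < table_group.length, table_group.getD i "" = table_group.getD 0 "" →
    i + 4 ≤ table_group.length ∧
    ∀ j < i + 4, i < j → table_group.getD j "" ≠ table_group.getD 0 ""
instance (table_group : List String) (tables : List (String × List (List String))) : Decidable (Pre_extract_information_from_table_group table_group tables) := by unfold Pre_extract_information_from_table_group; infer_instance

def pvWitness_extract_information_from_table_group : List String × (List (String × List (List String))) :=
  (["Table A", "junk", "one two", "---- ----", "1111 2222"], [("other", [["x"]])])

def Spec_extract_information_from_table_group (table_group : List String) (tables : List (String × List (List String))) (out : List (String × List (List String))) : Prop := out = extract_information_from_table_group_alt table_group tables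
instance (table_group : List String) (tables : List (String × List (List String))) (out : List (String × List (List String))) : Decidable (Spec_extract_information_from_table_group table_group tables out) := by unfold Spec_extract_information_from_table_group; infer_instance

-- ===== CLAIM (what is proved, stated in full; the proofs are below) =====
def Claim_equal_extract_information_from_table_group : Prop := ∀ (table_group : List String) (tables : List (String × List (List String))), Dom_extract_information_from_table_group table_group tables → Pre_extract_information_from_table_group table_group tables → Spec_extract_information_from_table_group table_group tables (extract_information_from_table_group table_group tables)

-- ===== LEMMAS AND PROOFS =====

-- positions of the title occurrences, recursively, with the final len(table_group) appended
def occList (title : String) : List String → List Nat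
  | [] => []
  | x :: xs => if x = title then 0 :: (occList title xs).map (· + 1) else (occList title xs).map (· + 1)

def posList (title : String) (xs : List String) : List Nat := occList title xs ++ [xs.length]

-- the slices A takes between consecutive positions
def pairSlices (tg : List String) : List Nat → List (List String)
  | a :: b :: rest => (tg.drop a).take (b - a) :: pairSlices tg (b :: rest)
  | _ => []

-- the segments B accumulates
def segT (title : String) (cur : List String) : List String → List (List String)
  | [] => [cur]
  | x :: xs => if x = title then cur :: segT title [x] xs else segT title (cur ++ [x]) xs

theorem posList_cons (title : String) (x : String) (xs : List String) :
    posList title (x :: xs) =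
      if x = title then 0 :: (posList title xs).map (· + 1) else (posList title xs).map (· + 1) := by
  by_cases h : x = title <;> simp [posList, occList, h, List.map_append]

theorem map_add_one_add (l : List Nat) (i : Nat) :
    (l.map (· + 1)).map (· + i) = l.map (· + (i + 1)) := by
  rw [List.map_map]
  apply List.map_congr_left
  intro a _
  simp [Function.comp]
  omega

theorem itpLoop_eq (tg : List String) (title : String) :
    ∀ (fuel i : Nat) (acc : List Nat), tg.length ≤ i + fuel →
      itpLoop tg title fuel i acc = acc ++ (occList title (tg.drop i)).map (· + i) := by
  intro fuel
  induction fuel with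
  | zero =>
    intro i acc hle
    rw [List.drop_eq_nil_of_le (by omega)]
    simp [itpLoop, occList]
  | succ fuel ih =>
    intro i acc hle
    by_cases h : i < tg.length
    · rw [show itpLoop tg title (fuel + 1) i acc
          = itpLoop tg title fuel (i + 1) (if tg.getD i "" = title then acc ++ [i] else acc) from by
        simp [itpLoop, h]]
      rw [ih (i + 1) _ (by omega)]
      rw [List.getD_eq_getElem _ _ h, List.drop_eq_getElem_cons h]
      by_cases hx : tg[i] = title
      · simp [occList, hx, map_add_one_add, List.append_assoc]
        intro a _
        omega
      · simp [occList, hx, map_add_one_add]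
        intro a _
        omega
    · rw [List.drop_eq_nil_of_le (by omega)]
      simp [itpLoop, h, occList]

theorem itp_eq_posList (tg : List String) (title : String) :
    index_table_positions tg title = posList title tg := by
  rw [index_table_positions, itpLoop_eq tg title _ _ _ (by omega)]
  simp [posList, List.drop_zero]

theorem aLoop_eq (tg : List String) (title : String) (pos : List Nat) :
    ∀ (fuel ti : Nat) (d : PySem.Dict String (List (List String))), pos.length ≤ ti + fuel →
      aLoop tg title pos fuel ti d =
        (pairSlices tg (pos.drop ti)).foldl
          (fun d sl => d.modify title [] (· ++ gather_table_columns sl)) d := by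
  intro fuel
  induction fuel with
  | zero =>
    intro ti d hle
    rw [List.drop_eq_nil_of_le (by omega)]
    simp [aLoop, pairSlices]
  | succ fuel ih =>
    intro ti d hle
    by_cases h : ti + 1 < pos.length
    · have h1 : ti < pos.length := by omega
      rw [show aLoop tg title pos (fuel + 1) ti d
            = aLoop tg title pos fuel (ti + 1)
                (d.modify title []
                  (· ++ gather_table_columns
                    ((tg.drop (pos.getD ti 0)).take (pos.getD (ti + 1) 0 - pos.getD ti 0)))) from by
          simp [aLoop, h]]
      rw [ih (ti + 1) _ (by omega)]
      rw [List.drop_eq_getElem_cons h1, List.drop_eq_getElem_cons h,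
        List.getD_eq_getElem _ _ h1, List.getD_eq_getElem _ _ h]
      rfl
    · have hend : aLoop tg title pos (fuel + 1) ti d = d := by
        simp [aLoop, h]
      rw [hend]
      rcases hdrop : pos.drop ti with _ | ⟨a, _ | ⟨b, rest⟩⟩
      · simp [pairSlices]
      · simp [pairSlices]
      · have : (pos.drop ti).length ≤ 1 := by
          simp [List.length_drop]
          omega
        rw [hdrop] at this
        simp at this

-- shift lemma: slicing at shifted positions is slicing the dropped list
theorem pairSlices_shift (L : List String) (k : Nat) (ps : List Nat) :
    pairSlices L (ps.map (· + k)) = pairSlices (L.drop k) ps := by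
  match ps with
  | [] => simp [pairSlices]
  | [a] => simp [pairSlices]
  | a :: b :: rest =>
    simp only [List.map_cons, pairSlices]
    congr 1
    · have h1 : b + k - (a + k) = b - a := by omega
      have h2 : (L.drop k).drop a = L.drop (a + k) := by
        rw [List.drop_drop]; congr 1; omega
      rw [h1, h2]
    · have h3 : (b + k) :: List.map (fun x => x + k) rest = ((b :: rest).map (· + k)) := by
        simp
      rw [h3, pairSlices_shift L k (b :: rest)]

-- the central lemma: A's slices between consecutive positions are B's one-pass segments
theorem pairSlices_posList (xs : List String) (t : String) (cur : List String) :
    pairSlices (cur ++ xs) (0 :: (posList t xs).map (· + cur.length)) = segT t cur xs := by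
  induction xs generalizing cur with
  | nil =>
    simp [posList, occList, pairSlices, segT]
  | cons x xs ih =>
    rw [posList_cons]
    by_cases hx : x = t
    · rw [if_pos hx]
      simp only [segT, if_pos hx]
      simp only [List.map_cons, Nat.zero_add]
      rw [pairSlices]
      congr 1
      · rw [Nat.sub_zero, List.drop_zero]
        exact List.take_left
      · have hmap : (cur.length :: ((posList t xs).map (· + 1)).map (· + cur.length))
            = ((0 :: (posList t xs).map (· + 1)).map (· + cur.length)) := by
          simp
        rw [hmap, pairSlices_shift, List.drop_left]
        have := ih (cur := [x])
        rw [show (0 : Nat) :: (posList t xs).map (· + 1)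
              = 0 :: (posList t xs).map (· + [x].length) from by simp]
        exact this
    · rw [if_neg hx]
      simp only [segT, if_neg hx]
      have hre : cur ++ x :: xs = (cur ++ [x]) ++ xs := by simp
      have hmap : ((posList t xs).map (· + 1)).map (· + cur.length)
          = (posList t xs).map (· + (cur ++ [x]).length) := by
        rw [map_add_one_add]
        apply List.map_congr_left
        intro a _
        simp
      rw [hre, hmap]
      exact ih (cur := cur ++ [x])

-- gather_table_columns equals B's segment_columns on every input
theorem gtcCols_eq (row : List Char) (limits : List Nat) :
    ∀ (fuel j : Nat) (acc : List String), limits.length ≤ j + fuel + 1 →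
      gtcCols row limits fuel j acc =
        acc ++ ((limits.drop j).zip (limits.drop (j + 1))).map
          (fun p => String.mk ((row.drop p.1).take (p.2 - p.1))) := by
  intro fuel
  induction fuel with
  | zero =>
    intro j acc hle
    rw [show limits.drop (j + 1) = [] from List.drop_eq_nil_of_le (by omega)]
    simp [gtcCols]
  | succ fuel ih =>
    intro j acc hle
    by_cases h : j + 1 < limits.length
    · have h1 : j < limits.length := by omega
      rw [show gtcCols row limits (fuel + 1) j acc
            = gtcCols row limits fuel (j + 1)
                (acc ++ [String.mk ((row.drop (limits.getD j 0)).take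
                  (limits.getD (j + 1) 0 - limits.getD j 0))]) from by
          simp [gtcCols, h]]
      rw [ih (j + 1) _ (by omega)]
      rw [List.getD_eq_getElem _ _ h1, List.getD_eq_getElem _ _ h,
        List.drop_eq_getElem_cons h1, List.drop_eq_getElem_cons h]
      simp only [List.zip_cons_cons, List.map_cons, List.append_assoc,
        List.cons_append, List.nil_append]
    · rw [show limits.drop (j + 1) = [] from List.drop_eq_nil_of_le (by omega)]
      simp [gtcCols, h]

theorem gtcRows_eq (table : List String) (limits : List Nat) :
    ∀ (fuel i : Nat) (acc : List (List String)), table.length ≤ i + fuel →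
      gtcRows table limits fuel i acc =
        acc ++ (table.drop i).map
          (fun row => gtcCols row.toList limits (limits.length + 1) 0 []) := by
  intro fuel
  induction fuel with
  | zero =>
    intro i acc hle
    rw [List.drop_eq_nil_of_le (by omega)]
    simp [gtcRows]
  | succ fuel ih =>
    intro i acc hle
    by_cases h : i < table.length
    · rw [show gtcRows table limits (fuel + 1) i acc
            = gtcRows table limits fuel (i + 1)
                (acc ++ [gtcCols (table.getD i "").toList limits (limits.length + 1) 0 []]) from by
          simp [gtcRows, h]]
      rw [ih (i + 1) _ (by omega)]
      rw [List.getD_eq_getElem _ _ h, List.drop_eq_getElem_cons h]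
      simp only [List.map_cons, List.append_assoc, List.cons_append, List.nil_append]
    · rw [List.drop_eq_nil_of_le (by omega)]
      simp [gtcRows, h]

theorem gtc_eq_segment_columns : gather_table_columns = segment_columns := by
  funext t
  simp only [gather_table_columns, segment_columns]
  rw [gtcRows_eq _ _ _ _ _ (by omega), List.nil_append]
  apply List.map_congr_left
  intro row _
  rw [gtcCols_eq _ _ _ _ _ (by omega)]
  simp

-- B's paired fold equals the fold over the segments
theorem bFold_eq (title : String) (xs : List String)
    (d : PySem.Dict String (List (List String))) (cur : List String) :
    (xs.foldl
        (fun (st : PySem.Dict String (List (List String)) × List String) item =>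
          if item = title then (st.1.modify title [] (· ++ segment_columns st.2), [item])
          else (st.1, st.2 ++ [item])) (d, cur)).1.modify title []
      (· ++ segment_columns (xs.foldl
        (fun (st : PySem.Dict String (List (List String)) × List String) item =>
          if item = title then (st.1.modify title [] (· ++ segment_columns st.2), [item])
          else (st.1, st.2 ++ [item])) (d, cur)).2) =
      (segT title cur xs).foldl
        (fun d sl => d.modify title [] (· ++ segment_columns sl)) d := by
  induction xs generalizing d cur with
  | nil => simp [segT]
  | cons x xs ih =>
    by_cases hx : x = title
    · simp only [List.foldl_cons, if_pos hx, segT, if_pos hx, List.foldl_cons]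
      exact ih _ _
    · simp only [List.foldl_cons, if_neg hx, segT, if_neg hx, List.foldl_cons]
      exact ih _ _

theorem main_eq (x : String) (xs : List String) (tables : List (String × List (List String))) :
    extract_information_from_table_group (x :: xs) tables =
      extract_information_from_table_group_alt (x :: xs) tables := by
  simp only [extract_information_from_table_group, extract_information_from_table_group_alt,
    List.getD_cons_zero, List.drop_one, List.tail_cons]
  rw [aLoop_eq _ _ _ _ _ _ (by omega), gtc_eq_segment_columns, bFold_eq, List.drop_zero,
    itp_eq_posList]
  have h0 : posList x (x :: xs) = 0 :: (posList x xs).map (· + 1) := by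
    rw [posList_cons]; simp
  rw [h0]
  exact congrArg _ (congrArg (List.foldl _ _) (pairSlices_posList xs x [x]))

-- ===== VERDICT (by name: the statement is the Claim_ definition above) =====
theorem extract_information_from_table_group_spec : Claim_equal_extract_information_from_table_group := by
  intro table_group tables _hdom hpre
  unfold Spec_extract_information_from_table_group
  obtain ⟨hlen, -⟩ := hpre
  match table_group with
  | [] => simp at hlen
  | x :: xs => exact main_eq x xs tables
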